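-- pv_equiv track=rewrite | github.com/mchmir/repo-sql-py-adm | pyton/PY-ASW/parser-new-param-wprofiles.py | parse_assignments
-- ===== SOURCE A (Python) =====
-- def split_args(s: str):
--     args, cur, in_str, i, n = [], [], False, 0, len(s)
--     while i < n:
--         ch = s[i]
--         if in_str:
--             if ch == "'":
--                 if i + 1 < n and s[i + 1] == "'":
--                     cur.append("''"); i += 2
--                 else:
--                     cur.append(ch); i += 1; in_str = False
--             else:
--                 cur.append(ch); i += 1
--         else:
--             if ch == "'":
--                 cur.append(ch); in_str = True; i += 1
--             elif ch == ",":
--                 args.append("".join(cur).strip()); cur = []; i += 1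
--             else:
--                 cur.append(ch); i += 1
--     token = "".join(cur).strip()
--     if token != "" or s.endswith(","):
--         args.append(token)
--     return args
--
-- def parse_assignments(s: str):
--     pairs = []
--     for tok in split_args(s):
--         if not tok:
--             continue
--         eq = tok.find("=")
--         if eq < 0:
--             pairs.append((tok.strip(), None))
--         else:
--             name = tok[:eq].strip()
--             val = tok[eq + 1:].strip()
--             pairs.append((name, val))
--     return pairs
-- ===== SOURCE B (Python) =====
-- def parse_assignments(s: str):
--     # Single pass: no intermediate token list, no re-scan of tokens.
--     pairs = []
--     name, val = [], []
--     seen_eq = False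
--     in_str = False
--
--     def emit():
--         if seen_eq:
--             pairs.append(("".join(name).strip(), "".join(val).strip()))
--         else:
--             t = "".join(name).strip()
--             if t:
--                 pairs.append((t, None))
--
--     i, n = 0, len(s)
--     while i < n:
--         ch = s[i]
--         if ch == "'":
--             if in_str and i + 1 < n and s[i + 1] == "'":
--                 (val if seen_eq else name).append("''")
--                 i += 2
--                 continue
--             in_str = not in_str
--             (val if seen_eq else name).append("'")
--         elif ch == "=" and not seen_eq:
--             seen_eq = True
--         elif ch == "," and not in_str:
--             emit()
--             name, val, seen_eq = [], [], False
--         else: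
--             (val if seen_eq else name).append(ch)
--         i += 1
--     emit()
--     return pairs
-- ===== Notes on version B (the rewrite author's own statement) =====
-- stated objective: alternative
-- what changed: B parses in a single character scan with a seen_eq flag and separate name/value buffers, instead of A's two-phase tokenize-into-a-list then re-scan each token for the first equals sign.
import Mathlib
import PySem

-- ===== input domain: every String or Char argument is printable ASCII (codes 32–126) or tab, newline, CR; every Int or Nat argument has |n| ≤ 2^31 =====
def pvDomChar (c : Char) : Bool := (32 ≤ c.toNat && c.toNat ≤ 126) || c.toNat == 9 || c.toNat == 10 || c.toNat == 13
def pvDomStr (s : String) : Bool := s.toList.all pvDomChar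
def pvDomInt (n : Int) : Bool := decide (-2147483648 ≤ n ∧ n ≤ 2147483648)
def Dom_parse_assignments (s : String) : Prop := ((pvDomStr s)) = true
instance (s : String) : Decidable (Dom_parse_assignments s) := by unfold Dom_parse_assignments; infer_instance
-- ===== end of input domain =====

-- B replaces A's two-phase "tokenize into a list, then re-scan each token for the first equals sign" by a
-- single character scan with a seen_eq flag and separate name/value buffers (alternative decomposition, same cost).


-- ===== PORT A =====

-- the while-loop of split_args: state (cur, in_str, args); returns (args, final cur)
def pvAsplit (cs : List Char) (in_str : Bool) (cur : List Char) (args : List (List Char)) :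
    List (List Char) × List Char :=
  match cs with
  | [] => (args, cur)
  | ch :: rest =>
    if in_str then
      if ch = '\'' then
        match rest with
        | c2 :: rest2 =>
          if c2 = '\'' then pvAsplit rest2 true (cur ++ ['\'', '\'']) args
          else pvAsplit (c2 :: rest2) false (cur ++ [ch]) args
        | [] => pvAsplit [] false (cur ++ [ch]) args
      else pvAsplit rest true (cur ++ [ch]) args
    else
      if ch = '\'' then pvAsplit rest true (cur ++ [ch]) args
      else if ch = ',' then pvAsplit rest false [] (args ++ [PySem.Chars.strip cur])
      else pvAsplit rest false (cur ++ [ch]) args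
termination_by cs.length
decreasing_by all_goals (subst_vars; simp; try omega)

def pvSplitArgsA (s : String) : List (List Char) :=
  let r := pvAsplit s.toList false [] []
  let token := PySem.Chars.strip r.2
  if token ≠ [] ∨ PySem.Chars.endswith s.toList [','] = true then r.1 ++ [token] else r.1

-- the body of parse_assignments' for-loop on one token
def pvEmitA (tok : List Char) : List (String × Option String) :=
  if tok = [] then []
  else
    let eq := PySem.Chars.find tok ['=']
    if eq < 0 then [(String.ofList (PySem.Chars.strip tok), none)]
    else [(String.ofList (PySem.Chars.strip (PySem.Chars.slice tok none (some eq))),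
           some (String.ofList (PySem.Chars.strip (PySem.Chars.slice tok (some (eq + 1)) none))))]

def parse_assignments (s : String) : List (String × Option String) :=
  (pvSplitArgsA s).foldl (fun pairs tok => pairs ++ pvEmitA tok) []

-- ===== PORT B =====

-- emit(): finalize the current token from the two buffers
def pvBemit (seen : Bool) (nameb valb : List Char) : List (String × Option String) :=
  if seen then [(String.ofList (PySem.Chars.strip nameb), some (String.ofList (PySem.Chars.strip valb)))]
  else
    let t := PySem.Chars.strip nameb
    if t = [] then [] else [(String.ofList t, none)]

-- (val if seen_eq else name).append(frag)
def pvPush (seen : Bool) (nameb valb frag : List Char) : List Char × List Char :=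
  if seen then (nameb, valb ++ frag) else (nameb ++ frag, valb)

-- the single scan of B
def pvBloop (cs : List Char) (in_str seen : Bool) (nameb valb : List Char)
    (pairs : List (String × Option String)) : List (String × Option String) :=
  match cs with
  | [] => pairs ++ pvBemit seen nameb valb
  | ch :: rest =>
    if ch = '\'' ∧ in_str = true ∧ rest.head? = some '\'' then
      let nv := pvPush seen nameb valb ['\'', '\'']
      pvBloop rest.tail in_str seen nv.1 nv.2 pairs
    else if ch = '\'' then
      let nv := pvPush seen nameb valb ['\'']
      pvBloop rest (!in_str) seen nv.1 nv.2 pairs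
    else if ch = '=' ∧ seen = false then
      pvBloop rest in_str true nameb valb pairs
    else if ch = ',' ∧ in_str = false then
      pvBloop rest in_str false [] [] (pairs ++ pvBemit seen nameb valb)
    else
      let nv := pvPush seen nameb valb [ch]
      pvBloop rest in_str seen nv.1 nv.2 pairs
termination_by cs.length
decreasing_by all_goals (subst_vars; simp [List.length_tail]; try omega)

def parse_assignments_alt (s : String) : List (String × Option String) :=
  pvBloop s.toList false false [] [] []

-- ===== PRECONDITION & SPEC =====
def Spec_parse_assignments (s : String) (out : List (String × Option String)) : Prop := out = parse_assignments_alt s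
instance (s : String) (out : List (String × Option String)) : Decidable (Spec_parse_assignments s out) := by unfold Spec_parse_assignments; infer_instance

-- ===== CLAIM (what is proved, stated in full; the proofs are below) =====
def Claim_equal_parse_assignments : Prop := ∀ (s : String), Dom_parse_assignments s → Spec_parse_assignments s (parse_assignments s)

-- ===== LEMMAS AND PROOFS =====

-- what A's loop produces from the suffix cs, given current state (in_str, cur)
def pvAOut (cs : List Char) (in_str : Bool) (cur : List Char) : List (String × Option String) :=
  (pvAsplit cs in_str cur []).1.flatMap pvEmitA ++ pvEmitA (PySem.Chars.strip (pvAsplit cs in_str cur []).2)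

-- A's cur, reconstructed from B's state
def pvCur (seen : Bool) (nameb valb : List Char) : List Char :=
  if seen then nameb ++ '=' :: valb else nameb

lemma pvAsplit_args (cs : List Char) (in_str : Bool) (cur : List Char) (args : List (List Char)) :
    ∀ args', pvAsplit cs in_str cur args' =
      (args' ++ (pvAsplit cs in_str cur []).1, (pvAsplit cs in_str cur []).2) := by
  induction cs, in_str, cur, args using pvAsplit.induct
  case case1 in_str cur args =>
    intro args'; simp [pvAsplit]
  case case2 cur args rest2 ih =>
    intro args'
    rw [pvAsplit.eq_def]; conv_rhs => rw [pvAsplit.eq_def]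
    simp only [reduceIte]
    rw [ih, ih]
  case case3 cur args c2 rest2 h ih =>
    intro args'
    rw [pvAsplit.eq_def]; conv_rhs => rw [pvAsplit.eq_def]
    simp only [reduceIte, h, if_false]
    rw [ih, ih]
  case case4 cur args ih =>
    intro args'
    rw [pvAsplit.eq_def]; conv_rhs => rw [pvAsplit.eq_def]
    simp only [reduceIte]
    rw [ih, ih]
  case case5 cur args ch rest h ih =>
    intro args'
    rw [pvAsplit.eq_def]; conv_rhs => rw [pvAsplit.eq_def]
    simp only [reduceIte, h, if_false, if_true]
    rw [ih, ih]
  case case6 in_str cur args rest h ih =>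
    intro args'
    rw [pvAsplit.eq_def]; conv_rhs => rw [pvAsplit.eq_def]
    simp only [Bool.not_eq_true] at h; subst h
    simp only [reduceIte, Bool.false_eq_true, if_false, if_true]
    rw [ih, ih]
  case case7 in_str cur args rest h h2 ih =>
    intro args'
    rw [pvAsplit.eq_def]; conv_rhs => rw [pvAsplit.eq_def]
    simp only [Bool.not_eq_true] at h; subst h
    simp only [Bool.false_eq_true, if_false, show (',' = '\'') = False by simp, if_true,
      List.nil_append]
    rw [ih (args' ++ [PySem.Chars.strip cur]), ih [PySem.Chars.strip cur]]
    simp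
  case case8 in_str cur args ch rest h h1 h2 ih =>
    intro args'
    rw [pvAsplit.eq_def]; conv_rhs => rw [pvAsplit.eq_def]
    simp only [Bool.not_eq_true] at h; subst h
    simp only [reduceIte, Bool.false_eq_true, if_false, if_true, h1, h2]
    rw [ih, ih]

-- strip algebra
lemma pv_lstrip_idem (l : List Char) : PySem.Chars.lstrip (PySem.Chars.lstrip l) = PySem.Chars.lstrip l := by
  simp [PySem.Chars.lstrip, List.dropWhile_idempotent]

lemma pv_rstrip_append (n v : List Char) :
    PySem.Chars.rstrip (n ++ '=' :: v) = n ++ '=' :: PySem.Chars.rstrip v := by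
  simp only [PySem.Chars.rstrip, List.reverse_append, List.reverse_cons]
  rw [show v.reverse ++ ['='] ++ n.reverse = v.reverse ++ ('=' :: n.reverse) by simp]
  rw [List.dropWhile_append]
  have hsp : PySem.Chars.isspace '=' = false := by decide
  split_ifs with h
  · simp_all [List.dropWhile_cons, hsp]
  · simp

lemma pv_lstrip_append (n v : List Char) :
    PySem.Chars.lstrip (n ++ '=' :: v) = PySem.Chars.lstrip n ++ '=' :: v := by
  simp only [PySem.Chars.lstrip, List.dropWhile_append]
  have hsp : PySem.Chars.isspace '=' = false := by decide
  split_ifs with h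
  · simp_all [List.dropWhile_cons, hsp]
  · simp

lemma pv_strip_append (n v : List Char) :
    PySem.Chars.strip (n ++ '=' :: v) = PySem.Chars.lstrip n ++ '=' :: PySem.Chars.rstrip v := by
  simp [PySem.Chars.strip, pv_lstrip_append, pv_rstrip_append]

lemma pv_rstrip_cons (c : Char) (t : List Char) :
    PySem.Chars.rstrip (c :: t) =
      if PySem.Chars.isspace c = true ∧ PySem.Chars.rstrip t = [] then [] else c :: PySem.Chars.rstrip t := by
  simp only [PySem.Chars.rstrip, List.reverse_cons, List.dropWhile_append]
  by_cases hc : PySem.Chars.isspace c = true <;>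
  by_cases ht : List.dropWhile PySem.Chars.isspace t.reverse = [] <;>
  simp [hc, ht]

lemma pv_comm (l : List Char) :
    PySem.Chars.lstrip (PySem.Chars.rstrip l) = PySem.Chars.rstrip (PySem.Chars.lstrip l) := by
  induction l with
  | nil => simp [PySem.Chars.lstrip, PySem.Chars.rstrip]
  | cons c t ih =>
    rw [pv_rstrip_cons]
    by_cases hc : PySem.Chars.isspace c = true
    · by_cases hrt : PySem.Chars.rstrip t = []
      · have h2 : PySem.Chars.lstrip (c :: t) = PySem.Chars.lstrip t := by
          simp [PySem.Chars.lstrip, List.dropWhile_cons, hc]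
        rw [if_pos ⟨hc, hrt⟩, h2, ← ih, hrt]
      · simp only [hc, hrt, and_false, if_false]
        have h1 : PySem.Chars.lstrip (c :: PySem.Chars.rstrip t) = PySem.Chars.lstrip (PySem.Chars.rstrip t) := by
          simp [PySem.Chars.lstrip, List.dropWhile_cons, hc]
        have h2 : PySem.Chars.lstrip (c :: t) = PySem.Chars.lstrip t := by
          simp [PySem.Chars.lstrip, List.dropWhile_cons, hc]
        rw [h1, h2, ih]
    · have h2 : PySem.Chars.lstrip (c :: t) = c :: t := by
        simp [PySem.Chars.lstrip, List.dropWhile_cons, hc]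
      simp [hc, h2, pv_rstrip_cons, PySem.Chars.lstrip]

lemma pv_rstrip_idem (l : List Char) : PySem.Chars.rstrip (PySem.Chars.rstrip l) = PySem.Chars.rstrip l := by
  simp [PySem.Chars.rstrip, List.reverse_reverse, List.dropWhile_idempotent]

lemma pv_strip_lstrip (l : List Char) : PySem.Chars.strip (PySem.Chars.lstrip l) = PySem.Chars.strip l := by
  simp [PySem.Chars.strip, pv_lstrip_idem]

lemma pv_strip_rstrip (l : List Char) : PySem.Chars.strip (PySem.Chars.rstrip l) = PySem.Chars.strip l := by
  simp [PySem.Chars.strip, pv_comm, pv_rstrip_idem]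

lemma pv_strip_idem (l : List Char) : PySem.Chars.strip (PySem.Chars.strip l) = PySem.Chars.strip l := by
  simp [PySem.Chars.strip, pv_comm, pv_rstrip_idem, pv_lstrip_idem]

lemma pv_mem_lstrip {c : Char} {l : List Char} (h : c ∈ PySem.Chars.lstrip l) : c ∈ l := by
  exact (List.dropWhile_sublist _).mem h

lemma pv_mem_strip {c : Char} {l : List Char} (h : c ∈ PySem.Chars.strip l) : c ∈ l := by
  simp only [PySem.Chars.strip, PySem.Chars.rstrip, PySem.Chars.lstrip] at h
  rw [List.mem_reverse] at h
  have h2 := (List.dropWhile_sublist _).mem h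
  rw [List.mem_reverse] at h2
  exact (List.dropWhile_sublist _).mem h2

lemma pv_singleton_prefix (c : Char) (l : List Char) : [c] <+: l ↔ l.head? = some c := by
  cases l with
  | nil => simp
  | cons a t => simp [List.cons_prefix_cons, eq_comm]

lemma pv_find_eq (a b : List Char) (h : '=' ∉ a) :
    PySem.Chars.find (a ++ '=' :: b) ['='] = (a.length : Int) := by
  set t := a ++ '=' :: b with ht
  have hinf : ['='] <:+: t := by
    rw [List.singleton_infix_iff]; simp [ht]
  have hnn : 0 ≤ PySem.Chars.find t ['='] := (PySem.Chars.find_nonneg_iff t ['=']).2 hinf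
  obtain ⟨hpre, hmin⟩ := PySem.Chars.find_spec hnn
  have hk : (PySem.Chars.find t ['=']).toNat = a.length := by
    rcases lt_trichotomy (PySem.Chars.find t ['=']).toNat a.length with hlt | heq | hgt
    · exfalso
      rw [pv_singleton_prefix, List.head?_drop, ht, List.getElem?_append_left hlt] at hpre
      exact h (List.mem_of_getElem? hpre)
    · exact heq
    · exfalso
      apply hmin a.length hgt
      rw [pv_singleton_prefix, List.head?_drop, ht]
      simp
  omega

lemma pv_not_mem_iff_find_neg (t : List Char) :
    PySem.Chars.find t ['='] = -1 ↔ '=' ∉ t := by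
  rw [PySem.Chars.find_eq_neg_one_iff, List.singleton_infix_iff]

-- the finalize lemma: the two emits agree
lemma pv_emit_eq (seen : Bool) (nameb valb : List Char) (h : '=' ∉ nameb)
    (hv : seen = false → valb = []) :
    pvEmitA (PySem.Chars.strip (pvCur seen nameb valb)) = pvBemit seen nameb valb := by
  cases seen with
  | false =>
    have hv' : valb = [] := hv rfl
    subst hv'
    rw [show pvCur false nameb [] = nameb from by simp [pvCur]]
    by_cases h0 : PySem.Chars.strip nameb = []
    · simp [pvEmitA, pvBemit, h0]
    · have hne : '=' ∉ PySem.Chars.strip nameb := fun hm => h (pv_mem_strip hm)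
      have hfind : PySem.Chars.find (PySem.Chars.strip nameb) ['='] = -1 :=
        (pv_not_mem_iff_find_neg _).2 hne
      simp [pvEmitA, pvBemit, h0, hfind, pv_strip_idem]
  | true =>
    rw [show pvCur true nameb valb = nameb ++ '=' :: valb from by simp [pvCur]]
    rw [pv_strip_append]
    have hne : '=' ∉ PySem.Chars.lstrip nameb := fun hm => h (pv_mem_lstrip hm)
    have hfind := pv_find_eq (PySem.Chars.lstrip nameb) (PySem.Chars.rstrip valb) hne
    have htok : PySem.Chars.lstrip nameb ++ '=' :: PySem.Chars.rstrip valb ≠ [] := by simp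
    rw [pvEmitA, if_neg htok]
    simp only [hfind]
    rw [if_neg (by omega : ¬((PySem.Chars.lstrip nameb).length : Int) < 0)]
    have hsl1 : PySem.Chars.slice (PySem.Chars.lstrip nameb ++ '=' :: PySem.Chars.rstrip valb)
        none (some ((PySem.Chars.lstrip nameb).length : Int)) = PySem.Chars.lstrip nameb := by
      simp only [PySem.Chars.slice_eq_listSlice]
      rw [PySem.List.slice_to _ (by positivity)]
      rw [show (((PySem.Chars.lstrip nameb).length : Int)).toNat = (PySem.Chars.lstrip nameb).length by omega]
      exact List.take_left
    have hsl2 : PySem.Chars.slice (PySem.Chars.lstrip nameb ++ '=' :: PySem.Chars.rstrip valb)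
        (some (((PySem.Chars.lstrip nameb).length : Int) + 1)) none = PySem.Chars.rstrip valb := by
      simp only [PySem.Chars.slice_eq_listSlice]
      rw [PySem.List.slice_from _ (by positivity)]
      rw [show (((PySem.Chars.lstrip nameb).length : Int) + 1).toNat
            = (PySem.Chars.lstrip nameb ++ ['=']).length by simp]
      rw [show PySem.Chars.lstrip nameb ++ '=' :: PySem.Chars.rstrip valb
            = (PySem.Chars.lstrip nameb ++ ['=']) ++ PySem.Chars.rstrip valb by simp]
      exact List.drop_left
    rw [hsl1, hsl2, pv_strip_lstrip, pv_strip_rstrip]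
    simp [pvBemit]

lemma pvCur_push (seen : Bool) (n v f : List Char) :
    pvCur seen (pvPush seen n v f).1 (pvPush seen n v f).2 = pvCur seen n v ++ f := by
  cases seen <;> simp [pvCur, pvPush]

lemma pvA_step_dquote (t cur : List Char) :
    pvAsplit ('\'' :: '\'' :: t) true cur [] = pvAsplit t true (cur ++ ['\'', '\'']) [] := by
  rw [pvAsplit.eq_def]; simp

lemma pvA_step_quote_close (rest cur : List Char) (h : rest.head? ≠ some '\'') :
    pvAsplit ('\'' :: rest) true cur [] = pvAsplit rest false (cur ++ ['\'']) [] := by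
  cases rest with
  | nil => rw [pvAsplit.eq_def]; simp
  | cons c2 t =>
    have hc2 : c2 ≠ '\'' := by simpa using h
    rw [pvAsplit.eq_def]; simp [hc2]

lemma pvA_step_quote_open (rest cur : List Char) :
    pvAsplit ('\'' :: rest) false cur [] = pvAsplit rest true (cur ++ ['\'']) [] := by
  rw [pvAsplit.eq_def]; simp

lemma pvA_step_app (ch : Char) (rest cur : List Char) (in_str : Bool)
    (h1 : ch ≠ '\'') (h2 : in_str = true ∨ ch ≠ ',') :
    pvAsplit (ch :: rest) in_str cur [] = pvAsplit rest in_str (cur ++ [ch]) [] := by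
  cases in_str with
  | true => rw [pvAsplit.eq_def]; cases rest <;> simp [h1]
  | false =>
    have hc : ch ≠ ',' := h2.resolve_left (by simp)
    rw [pvAsplit.eq_def]; simp [h1, hc]

lemma pvA_step_comma (rest cur : List Char) :
    pvAsplit (',' :: rest) false cur [] =
      (PySem.Chars.strip cur :: (pvAsplit rest false [] []).1, (pvAsplit rest false [] []).2) := by
  rw [pvAsplit.eq_def]
  simp only [show (',' = '\'') = False by simp, Bool.false_eq_true, if_false, if_true,
    List.nil_append]
  rw [pvAsplit_args rest false [] [] [PySem.Chars.strip cur]]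
  simp

lemma pvAOut_nil (in_str : Bool) (cur : List Char) :
    pvAOut [] in_str cur = pvEmitA (PySem.Chars.strip cur) := by
  simp [pvAOut, pvAsplit]

lemma pvAOut_step (c : List Char → List Char) (cs cs' : List Char) (b b' : Bool) (cur : List Char)
    (h : pvAsplit cs b cur [] = pvAsplit cs' b' (c cur) []) :
    pvAOut cs b cur = pvAOut cs' b' (c cur) := by
  simp [pvAOut, h]

lemma pvAOut_comma (rest cur : List Char) :
    pvAOut (',' :: rest) false cur = pvEmitA (PySem.Chars.strip cur) ++ pvAOut rest false [] := by
  simp [pvAOut, pvA_step_comma]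

lemma pv_main (cs : List Char) (in_str seen : Bool) (nameb valb : List Char)
    (pairs : List (String × Option String)) :
    '=' ∉ nameb → (seen = false → valb = []) →
    ∀ pairs', pvBloop cs in_str seen nameb valb pairs' =
      pairs' ++ pvAOut cs in_str (pvCur seen nameb valb) := by
  induction cs, in_str, seen, nameb, valb, pairs using pvBloop.induct
  case case1 in_str seen nameb valb pairs =>
    intro h hv pairs'
    rw [pvBloop.eq_def]
    simp only [pvAOut_nil]
    rw [pv_emit_eq seen nameb valb h hv]
  case case2 in_str seen nameb valb pairs ch rest hcond nv ih =>
    intro h hv pairs'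
    obtain ⟨hch, hin, hhd⟩ := hcond
    subst hch; subst hin
    obtain ⟨t, ht⟩ : ∃ t, rest = '\'' :: t := by
      cases rest with
      | nil => simp at hhd
      | cons a t =>
        simp only [List.head?_cons, Option.some.injEq] at hhd
        exact ⟨t, by rw [hhd]⟩
    subst ht
    have hnv : nv = pvPush seen nameb valb ['\'', '\''] := rfl
    rw [hnv] at ih
    simp only [List.tail_cons] at ih
    rw [pvBloop.eq_def]
    simp only [List.head?_cons, and_self, reduceIte, List.tail_cons]
    rw [ih (by cases seen <;> simp_all [pvPush]) (by cases seen <;> simp_all [pvPush]) pairs']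
    rw [pvCur_push]
    rw [pvAOut_step (fun cur => cur ++ ['\'', '\'']) _ t true true _ (pvA_step_dquote t _)]
  case case3 in_str seen nameb valb pairs rest nv hcond ih =>
    intro h hv pairs'
    have hnv : nv = pvPush seen nameb valb ['\''] := rfl
    rw [hnv] at ih
    have ih' := ih (by cases seen <;> simp_all [pvPush]) (by cases seen <;> simp_all [pvPush]) pairs'
    cases in_str with
    | true =>
      have hhd : rest.head? ≠ some '\'' := fun hx => hcond ⟨rfl, rfl, hx⟩
      rw [pvBloop.eq_def]
      simp only [Bool.not_true] at ih'
      simp only [reduceIte, hhd, and_false, true_and, false_and, if_false, Bool.not_true]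
      rw [ih', pvCur_push]
      rw [pvAOut_step (fun cur => cur ++ ['\'']) _ rest true false _ (pvA_step_quote_close rest _ hhd)]
    | false =>
      rw [pvBloop.eq_def]
      simp only [Bool.not_false] at ih'
      simp only [reduceIte, Bool.false_eq_true, and_false, false_and, if_false, Bool.not_false]
      rw [ih', pvCur_push]
      rw [pvAOut_step (fun cur => cur ++ ['\'']) _ rest false true _ (pvA_step_quote_open rest _)]
  case case4 in_str seen nameb valb pairs ch rest hc1 hc2 hcond ih =>
    intro h hv pairs'
    obtain ⟨hch, hseen⟩ := hcond
    subst hch; subst hseen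
    have hv' : valb = [] := hv rfl
    subst hv'
    rw [pvBloop.eq_def]
    simp only [hc1, hc2, if_false, and_self, reduceIte, Bool.false_eq_true, and_false,
      if_true, hc1, false_and]
    rw [ih h (by simp) pairs']
    have hcur : pvCur true nameb [] = pvCur false nameb [] ++ ['='] := by simp [pvCur]
    rw [hcur]
    rw [pvAOut_step (fun cur => cur ++ ['=']) _ rest in_str in_str _
      (pvA_step_app '=' rest _ in_str hc2 (by cases in_str <;> simp))]
  case case5 in_str seen nameb valb pairs ch rest hc1 hc2 hc3 hcond ih =>
    intro h hv pairs'
    obtain ⟨hch, hin⟩ := hcond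
    subst hch; subst hin
    rw [pvBloop.eq_def]
    simp only [hc1, hc2, hc3, if_false, and_self, reduceIte, Bool.false_eq_true, and_false]
    rw [ih (by simp) (by simp) (pairs' ++ pvBemit seen nameb valb)]
    rw [show pvCur false ([] : List Char) ([] : List Char) = [] from by simp [pvCur]]
    rw [pvAOut_comma rest (pvCur seen nameb valb)]
    rw [pv_emit_eq seen nameb valb h hv]
    simp
  case case6 in_str seen nameb valb pairs ch rest hc1 hc2 hc3 hc4 nv ih =>
    intro h hv pairs'
    have hnv : nv = pvPush seen nameb valb [ch] := rfl
    rw [hnv] at ih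
    rw [pvBloop.eq_def]
    simp only [hc1, hc2, hc3, hc4, if_false, reduceIte, false_and]
    have hne : ch ≠ '=' ∨ seen = true := by
      by_cases hs : seen = true
      · right; exact hs
      · left; intro hx; exact hc3 ⟨hx, by simpa using hs⟩
    rw [ih (by
        cases seen with
        | true => simpa [pvPush] using h
        | false =>
          have hch : ch ≠ '=' := fun hx => hc3 ⟨hx, rfl⟩
          simp [pvPush, List.mem_append, h, Ne.symm hch]) (by
        cases seen <;> simp_all [pvPush]) pairs']
    rw [pvCur_push]
    rw [pvAOut_step (fun cur => cur ++ [ch]) _ rest in_str in_str _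
      (pvA_step_app ch rest _ in_str hc2 (by
        cases in_str
        · right; intro hx; exact hc4 ⟨hx, rfl⟩
        · left; rfl))]

lemma pv_a_eq_aout (s : String) : parse_assignments s = pvAOut s.toList false [] := by
  unfold parse_assignments pvSplitArgsA pvAOut
  rw [PySem.List.foldl_append_eq_flatMap]
  simp only [List.nil_append]
  split_ifs with hc
  · simp [List.flatMap_append]
  · have htok : PySem.Chars.strip (pvAsplit s.toList false [] []).2 = [] := by
      by_contra hx
      exact hc (Or.inl hx)
    rw [htok]
    simp [pvEmitA]

-- ===== VERDICT (by name: the statement is the Claim_ definition above) =====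
theorem parse_assignments_spec : Claim_equal_parse_assignments := by
  intro s _
  show _ = _
  rw [pv_a_eq_aout]
  unfold parse_assignments_alt
  rw [pv_main s.toList false false [] [] [] (by simp) (by simp) []]
  rfl
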